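-- pv_equiv track=rewrite | github.com/Agentic-Environmental-Engineering/GymVerse | gem/gem/envs/RLVE/tree_distance_equal_triad_counting_env.py | _compute_reference_answer
-- ===== SOURCE A (Python) =====
-- from typing import Any, Optional, SupportsFloat, Tuple, List
-- from collections import deque
--
-- def _compute_reference_answer(N: int, edges: List[Tuple[int, int]]) -> int:
--     """Compute the number of triads with equal pairwise distances using branch BFS and symmetric sums."""
--     adjacency: List[List[int]] = [[] for _ in range(N + 1)]
--     for a, b in edges:
--         adjacency[a].append(b)
--         adjacency[b].append(a)
--
--     ans = 0
--
--     # For each candidate center c, we look at its branches (one per neighbor).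
--     # In each branch we BFS to record how many nodes lie at each distance d from c.
--     # Then for each distance d we have counts [c1, c2, ..., ck] across branches,
--     # and the number of ways to pick one node in three distinct branches all at that
--     # same distance is the 3rd elementary symmetric sum:
--     #    e3 = sum_{i<j<k} ci*cj*ck = (S1^3 - 3 S1 S2 + 2 S3) / 6,
--     # where S1 = sum ci, S2 = sum ci^2, S3 = sum ci^3.
--
--     for c in range(1, N + 1):
--         if len(adjacency[c]) < 3:
--             continue  # need at least 3 branches
--
--         visited = [False] * (N + 1)
--         visited[c] = True
--
--         branch_counts: List[List[int]] = []
--         max_depth = 0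
--
--         # BFS each branch separately, marking visited to avoid overlap
--         for nbr in adjacency[c]:
--             if visited[nbr]:
--                 continue
--             visited[nbr] = True
--             q = deque([(nbr, 1)])
--             local: List[int] = []  # local[d] = number of nodes at distance d in this branch
--             while q:
--                 u, d = q.popleft()
--                 # ensure local is long enough
--                 if d >= len(local):
--                     local.extend([0] * (d - len(local) + 1))
--                 local[d] += 1
--                 if d > max_depth:
--                     max_depth = d
--                 for w in adjacency[u]:
--                     if not visited[w]:
--                         visited[w] = True
--                         q.append((w, d + 1))
--             branch_counts.append(local)
--
--         b = len(branch_counts)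
--         if b < 3:
--             continue
--
--         # for each possible distance t, compute the 3-way product sum
--         for t in range(1, max_depth + 1):
--             S1 = 0
--             S2 = 0
--             S3 = 0
--             for f in branch_counts:
--                 cnt = f[t] if t < len(f) else 0
--                 S1 += cnt
--                 S2 += cnt * cnt
--                 S3 += cnt * cnt * cnt
--             # elementary symmetric sum of order 3
--             e3 = (S1 * S1 * S1 - 3 * S1 * S2 + 2 * S3) // 6
--             ans += e3
--
--     return ans
-- ===== SOURCE B (Python) =====
-- from collections import deque
-- from typing import List, Tuple
--
-- def _compute_reference_answer(N: int, edges: List[Tuple[int, int]]) -> int: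
--     """Count triads with equal pairwise distances: per-branch depth histograms kept
--     as dicts, merged into a per-distance incremental elementary-symmetric DP
--     (P1, P2, E3), so no padded lists, no max_depth and no distances-x-branches
--     double loop and no division formula."""
--     adjacency = [[] for _ in range(N + 1)]
--     for a, b in edges:
--         adjacency[a].append(b)
--         adjacency[b].append(a)
--
--     ans = 0
--     for c in range(1, N + 1):
--         if len(adjacency[c]) < 3:
--             continue
--
--         visited = [False] * (N + 1)
--         visited[c] = True
--
--         agg = {}  # distance d -> (P1, P2, E3): running elementary symmetric sums e1, e2, e3
--         nb = 0
--         for nbr in adjacency[c]: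
--             if visited[nbr]:
--                 continue
--             visited[nbr] = True
--             nb += 1
--             cnts = {}  # distance d -> number of nodes of this branch at distance d
--             q = deque([(nbr, 1)])
--             while q:
--                 u, d = q.popleft()
--                 cnts[d] = cnts.get(d, 0) + 1
--                 for w in adjacency[u]:
--                     if not visited[w]:
--                         visited[w] = True
--                         q.append((w, d + 1))
--             for d, cnt in cnts.items():
--                 p1, p2, e3 = agg.get(d, (0, 0, 0))
--                 agg[d] = (p1 + cnt, p2 + p1 * cnt, e3 + p2 * cnt)
--
--         if nb >= 3:
--             for _, _, e3 in agg.values():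
--                 ans += e3
--     return ans
-- ===== Notes on version B (the rewrite author's own statement) =====
-- stated objective: alternative
-- what changed: B drops A's zero-padded per-branch distance lists, max_depth tracking and the distances-by-branches double loop with the (S1^3-3*S1*S2+2*S3)//6 power-sum formula, instead keeping per-branch depth histograms as dicts and merging them into one dict mapping each present distance to incrementally maintained elementary symmetric sums (e1,e2,e3), summing e3 at the end.
import Mathlib
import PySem

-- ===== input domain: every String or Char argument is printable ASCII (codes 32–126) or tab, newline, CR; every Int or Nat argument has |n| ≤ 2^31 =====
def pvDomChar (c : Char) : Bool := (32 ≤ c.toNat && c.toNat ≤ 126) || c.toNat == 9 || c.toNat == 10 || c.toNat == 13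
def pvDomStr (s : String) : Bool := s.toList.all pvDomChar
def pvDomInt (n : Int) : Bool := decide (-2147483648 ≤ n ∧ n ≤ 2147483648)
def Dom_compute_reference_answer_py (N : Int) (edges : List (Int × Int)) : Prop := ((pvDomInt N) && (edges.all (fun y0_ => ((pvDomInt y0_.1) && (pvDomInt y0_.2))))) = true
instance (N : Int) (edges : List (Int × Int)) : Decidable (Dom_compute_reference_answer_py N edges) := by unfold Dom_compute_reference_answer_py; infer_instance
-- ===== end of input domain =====

-- B replaces A's padded per-branch lists, max_depth tracking and the
-- distances×branches double loop (power sums + division formula) by per-branch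
-- depth dicts merged into one dict distance ↦ running elementary symmetric sums
-- (e1, e2, e3); objective: alternative (same asymptotic cost).

-- ===== PORT A =====
-- Python list index (negative wraps); exact for -sz ≤ i < sz, which Pre_ guarantees
def pvIdx (sz i : Int) : Nat := (if i < 0 then i + sz else i).toNat

-- adjacency = [[] for _ in range(N+1)]; adjacency[a].append(b); adjacency[b].append(a)
def pvAdj (N : Int) (edges : List (Int × Int)) : List (List Int) :=
  edges.foldl
    (fun adj e =>
      (adj.modify (pvIdx (N + 1) e.1) (· ++ [e.2])).modify (pvIdx (N + 1) e.2) (· ++ [e.1]))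
    (List.replicate (N + 1).toNat ([] : List Int))

-- for w in adjacency[u]: if not visited[w]: visited[w] = True; q.append((w, d+1))
-- (identical inner loop in both Pythons, hence shared by both ports)
def pvScan (adj : List (List Int)) (sz u d : Int) (vis : List Bool) (q : List (Int × Int)) :
    List Bool × List (Int × Int) :=
  (adj.getD (pvIdx sz u) []).foldl
    (fun p w =>
      if p.1.getD (pvIdx sz w) false then p
      else (p.1.set (pvIdx sz w) true, p.2 ++ [(w, d + 1)]))
    (vis, q)

-- A's while q: pop (u,d); pad local up to index d; local[d] += 1; track max_depth; scan
def pvBfsA (adj : List (List Int)) (sz : Int) :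
    Nat → List (Int × Int) → List Bool → List Int → Int → List Bool × List Int × Int
  | 0, _, vis, loc, maxd => (vis, loc, maxd)
  | _ + 1, [], vis, loc, maxd => (vis, loc, maxd)
  | fuel + 1, (u, d) :: q, vis, loc, maxd =>
    let loc1 := if (loc.length : Int) ≤ d then loc ++ List.replicate (d - loc.length + 1).toNat 0 else loc
    let loc2 := loc1.modify d.toNat (· + 1)
    let maxd1 := if d > maxd then d else maxd
    let vq := pvScan adj sz u d vis q
    pvBfsA adj sz fuel vq.2 vq.1 loc2 maxd1

-- one iteration of A's branch loop over the neighbours of the centre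
def pvBranchStepA (adj : List (List Int)) (sz : Int) (fuel : Nat)
    (st : List Bool × List (List Int) × Int) (nbr : Int) : List Bool × List (List Int) × Int :=
  if st.1.getD (pvIdx sz nbr) false then st
  else
    let vis1 := st.1.set (pvIdx sz nbr) true
    let r := pvBfsA adj sz fuel [(nbr, 1)] vis1 [] st.2.2
    (r.1, st.2.1 ++ [r.2.1], r.2.2)

def compute_reference_answer_py (N : Int) (edges : List (Int × Int)) : Int :=
  let adj := pvAdj N edges
  (PySem.List.pyRange 1 (N + 1) 1).foldl
    (fun ans c =>
      if (adj.getD (pvIdx (N + 1) c) []).length < 3 then ans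
      else
        let vis0 := (List.replicate (N + 1).toNat false).set (pvIdx (N + 1) c) true
        -- fuel: one unit per popped node; ≤ N+2 pops per branch BFS (each enqueue marks a node)
        let r := (adj.getD (pvIdx (N + 1) c) []).foldl (pvBranchStepA adj (N + 1) (N + 2).toNat)
          (vis0, [], 0)
        if r.2.1.length < 3 then ans
        else
          (PySem.List.pyRange 1 (r.2.2 + 1) 1).foldl
            (fun ans t =>
              let s := r.2.1.foldl
                (fun (s : Int × Int × Int) f =>
                  let cnt := if t < (f.length : Int) then f.getD t.toNat 0 else 0
                  (s.1 + cnt, s.2.1 + cnt * cnt, s.2.2 + cnt * cnt * cnt))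
                (0, 0, 0)
              ans + PySem.Int.floordiv (s.1 * s.1 * s.1 - 3 * s.1 * s.2.1 + 2 * s.2.2) 6)
            ans)
    0

-- ===== PORT B =====
-- agg.get(d,(0,0,0)) updated to (p1+cnt, p2+p1*cnt, e3+p2*cnt)
def pvStep (p : Int × Int × Int) (cnt : Int) : Int × Int × Int :=
  (p.1 + cnt, p.2.1 + p.1 * cnt, p.2.2 + p.2.1 * cnt)

-- B's while q: pop (u,d); cnts[d] = cnts.get(d,0) + 1; scan
def pvBfsB (adj : List (List Int)) (sz : Int) :
    Nat → List (Int × Int) → List Bool → PySem.Dict Int Int → List Bool × PySem.Dict Int Int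
  | 0, _, vis, cnts => (vis, cnts)
  | _ + 1, [], vis, cnts => (vis, cnts)
  | fuel + 1, (u, d) :: q, vis, cnts =>
    let cnts1 := cnts.insert d (cnts.getD d 0 + 1)
    let vq := pvScan adj sz u d vis q
    pvBfsB adj sz fuel vq.2 vq.1 cnts1

-- for d, cnt in cnts.items(): agg[d] = step(agg.get(d,(0,0,0)), cnt)
def pvMerge (agg : PySem.Dict Int (Int × Int × Int)) (cnts : PySem.Dict Int Int) :
    PySem.Dict Int (Int × Int × Int) :=
  cnts.items.foldl (fun agg dv => agg.insert dv.1 (pvStep (agg.getD dv.1 (0, 0, 0)) dv.2)) agg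

-- one iteration of B's branch loop
def pvBranchStepB (adj : List (List Int)) (sz : Int) (fuel : Nat)
    (st : List Bool × PySem.Dict Int (Int × Int × Int) × Int) (nbr : Int) :
    List Bool × PySem.Dict Int (Int × Int × Int) × Int :=
  if st.1.getD (pvIdx sz nbr) false then st
  else
    let vis1 := st.1.set (pvIdx sz nbr) true
    let r := pvBfsB adj sz fuel [(nbr, 1)] vis1 PySem.Dict.empty
    (r.1, pvMerge st.2.1 r.2, st.2.2 + 1)

def compute_reference_answer_py_alt (N : Int) (edges : List (Int × Int)) : Int :=
  let adj := pvAdj N edges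
  (PySem.List.pyRange 1 (N + 1) 1).foldl
    (fun ans c =>
      if (adj.getD (pvIdx (N + 1) c) []).length < 3 then ans
      else
        let vis0 := (List.replicate (N + 1).toNat false).set (pvIdx (N + 1) c) true
        let r := (adj.getD (pvIdx (N + 1) c) []).foldl (pvBranchStepB adj (N + 1) (N + 2).toNat)
          (vis0, PySem.Dict.empty, 0)
        if r.2.2 ≥ 3 then ans + r.2.1.values.foldl (fun s v => s + v.2.2) 0 else ans)
    0

-- ===== PRECONDITION & SPEC =====
-- Pre_ excludes exactly the inputs on which Python A raises IndexError:
-- an edge endpoint outside the valid index range [-(N+1), N] of the (N+1)-slot adjacency list.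
def Pre_compute_reference_answer_py (N : Int) (edges : List (Int × Int)) : Prop :=
  ∀ e ∈ edges, -(N + 1) ≤ e.1 ∧ e.1 ≤ N ∧ -(N + 1) ≤ e.2 ∧ e.2 ≤ N
instance (N : Int) (edges : List (Int × Int)) : Decidable (Pre_compute_reference_answer_py N edges) := by
  unfold Pre_compute_reference_answer_py; infer_instance

def pvWitness_compute_reference_answer_py : Int × (List (Int × Int)) :=
  (4, [(1, 2), (1, 3), (1, 4)])

def Spec_compute_reference_answer_py (N : Int) (edges : List (Int × Int)) (out : Int) : Prop := out = compute_reference_answer_py_alt N edges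
instance (N : Int) (edges : List (Int × Int)) (out : Int) : Decidable (Spec_compute_reference_answer_py N edges out) := by unfold Spec_compute_reference_answer_py; infer_instance

-- ===== CLAIM (what is proved, stated in full; the proofs are below) =====
def Claim_equal_compute_reference_answer_py : Prop := ∀ (N : Int) (edges : List (Int × Int)), Dom_compute_reference_answer_py N edges → Pre_compute_reference_answer_py N edges → Spec_compute_reference_answer_py N edges (compute_reference_answer_py N edges)

-- ===== LEMMAS AND PROOFS =====

lemma pvStep_zero (p : Int × Int × Int) : pvStep p 0 = p := by
  simp [pvStep]

-- A's "pad local to length > d, then local[d] += 1" seen through getD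
lemma pv_getD_append_replicate (loc : List Int) (k t : Nat) :
    (loc ++ List.replicate k (0 : Int)).getD t 0 = loc.getD t 0 := by
  rcases Nat.lt_or_ge t loc.length with h | h
  · rw [List.getD_append _ _ _ _ h]
  · rw [List.getD_eq_default _ _ h]
    simp [List.getD_eq_getElem?_getD, List.getElem?_append_right h, List.getElem?_replicate]
    split <;> simp

lemma pv_padinc (loc : List Int) (d : Int) (hd : 0 ≤ d) (t : Nat) :
    ((if (loc.length : Int) ≤ d then loc ++ List.replicate (d - loc.length + 1).toNat 0
      else loc).modify d.toNat (· + 1)).getD t 0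
      = loc.getD t 0 + (if t = d.toNat then 1 else 0) := by
  set L := (if (loc.length : Int) ≤ d then loc ++ List.replicate (d - loc.length + 1).toNat 0
      else loc) with hL
  have hget : ∀ u : Nat, L.getD u 0 = loc.getD u 0 := by
    intro u; rw [hL]; split
    · exact pv_getD_append_replicate _ _ _
    · rfl
  have hlen : d.toNat < L.length := by
    rw [hL]; split <;> rename_i h
    · rw [List.length_append, List.length_replicate]; omega
    · omega
  rw [List.getD_eq_getElem?_getD, List.getElem?_modify]
  by_cases he : t = d.toNat
  · subst he
    rw [List.getElem?_eq_getElem hlen]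
    have h3 : L[d.toNat] = loc.getD d.toNat 0 := by
      have := hget d.toNat
      rwa [List.getD_eq_getElem _ _ hlen] at this
    simp [h3]
  · have hne : ¬ d.toNat = t := fun h => he h.symm
    simp only [hne, if_false]
    have hid : ((fun a => a) <$> L[t]?) = L[t]? := by cases L[t]? <;> rfl
    rw [hid, ← List.getD_eq_getElem?_getD, if_neg he, add_zero]
    exact hget t

-- every entry the scan appends to the queue carries depth d+1
lemma pvScan_mem (adj : List (List Int)) (sz u d : Int) (vis : List Bool)
    (q : List (Int × Int)) :
    ∀ p ∈ (pvScan adj sz u d vis q).2, p ∈ q ∨ p.2 = d + 1 := by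
  unfold pvScan
  generalize (adj.getD (pvIdx sz u) []) = l
  induction l generalizing vis q with
  | nil => intro p hp; exact Or.inl hp
  | cons w l ih =>
    intro p hp
    simp only [List.foldl_cons] at hp
    split at hp
    · exact ih vis q p hp
    · rcases ih _ _ p hp with h | h
      · rcases List.mem_append.1 h with h | h
        · exact Or.inl h
        · simp at h; right; rw [h]
      · exact Or.inr h

-- lockstep relation between A's queue BFS (padded list, max depth) and B's (dict)
lemma pv_bfs_rel (adj : List (List Int)) (sz : Int) :
    ∀ (fuel : Nat) (q : List (Int × Int)) (vis : List Bool) (loc : List Int)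
      (cnts : PySem.Dict Int Int) (maxd : Int),
      0 ≤ maxd →
      (∀ p ∈ q, 1 ≤ p.2 ∧ p.2 ≤ maxd + 1) →
      (∀ t : Int, 1 ≤ t → loc.getD t.toNat 0 = cnts.getD t 0) →
      (∀ k ∈ cnts.keys, 1 ≤ k ∧ k ≤ maxd) →
      cnts.keys.Nodup →
      (pvBfsA adj sz fuel q vis loc maxd).1 = (pvBfsB adj sz fuel q vis cnts).1 ∧
      maxd ≤ (pvBfsA adj sz fuel q vis loc maxd).2.2 ∧
      (∀ t : Int, 1 ≤ t →
        (pvBfsA adj sz fuel q vis loc maxd).2.1.getD t.toNat 0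
          = (pvBfsB adj sz fuel q vis cnts).2.getD t 0) ∧
      (∀ k ∈ (pvBfsB adj sz fuel q vis cnts).2.keys,
        1 ≤ k ∧ k ≤ (pvBfsA adj sz fuel q vis loc maxd).2.2) ∧
      (pvBfsB adj sz fuel q vis cnts).2.keys.Nodup := by
  intro fuel
  induction fuel with
  | zero =>
    intro q vis loc cnts maxd hm hq hrel hkeys hnd
    exact ⟨rfl, le_refl _, hrel, hkeys, hnd⟩
  | succ fuel ih =>
    intro q vis loc cnts maxd hm hq hrel hkeys hnd
    match q with
    | [] => exact ⟨rfl, le_refl _, hrel, hkeys, hnd⟩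
    | (u, d) :: q =>
      obtain ⟨hd1, hd2⟩ := hq (u, d) (List.mem_cons_self)
      have hA : pvBfsA adj sz (fuel + 1) ((u, d) :: q) vis loc maxd
          = pvBfsA adj sz fuel (pvScan adj sz u d vis q).2 (pvScan adj sz u d vis q).1
              ((if (loc.length : Int) ≤ d then
                  loc ++ List.replicate (d - loc.length + 1).toNat 0 else loc).modify d.toNat (· + 1))
              (if d > maxd then d else maxd) := rfl
      have hB : pvBfsB adj sz (fuel + 1) ((u, d) :: q) vis cnts
          = pvBfsB adj sz fuel (pvScan adj sz u d vis q).2 (pvScan adj sz u d vis q).1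
              (cnts.insert d (cnts.getD d 0 + 1)) := rfl
      rw [hA, hB]
      have hmax1 : maxd ≤ (if d > maxd then d else maxd) := by split <;> omega
      have hdle : d ≤ (if d > maxd then d else maxd) := by split <;> omega
      have h0 : (0 : Int) ≤ (if d > maxd then d else maxd) := by omega
      have hq' : ∀ p ∈ (pvScan adj sz u d vis q).2,
          1 ≤ p.2 ∧ p.2 ≤ (if d > maxd then d else maxd) + 1 := by
        intro p hp
        rcases pvScan_mem adj sz u d vis q p hp with h | h
        · obtain ⟨ha, hb⟩ := hq p (List.mem_cons_of_mem _ h); omega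
        · omega
      have hrel' : ∀ t : Int, 1 ≤ t →
          ((if (loc.length : Int) ≤ d then
              loc ++ List.replicate (d - loc.length + 1).toNat 0 else loc).modify d.toNat
                (· + 1)).getD t.toNat 0
            = (cnts.insert d (cnts.getD d 0 + 1)).getD t 0 := by
        intro t ht
        rw [pv_padinc loc d (by omega) t.toNat, PySem.Dict.getD_insert]
        by_cases he : t = d
        · rw [if_pos (by omega : t.toNat = d.toNat), if_pos he, he, hrel d (by omega)]
        · rw [if_neg (by omega : ¬ t.toNat = d.toNat), if_neg he, add_zero, hrel t ht]
      have hkeys' : ∀ k ∈ (cnts.insert d (cnts.getD d 0 + 1)).keys,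
          1 ≤ k ∧ k ≤ (if d > maxd then d else maxd) := by
        intro k hk
        rcases (PySem.Dict.mem_keys_insert _ _ _ _).1 hk with h | h
        · omega
        · obtain ⟨ha, hb⟩ := hkeys k h; omega
      obtain ⟨r1, r2, r3, r4, r5⟩ := ih (pvScan adj sz u d vis q).2 (pvScan adj sz u d vis q).1 _ _ _
        h0 hq' hrel' hkeys' (PySem.Dict.nodup_keys_insert _ _ _ hnd)
      exact ⟨r1, le_trans hmax1 r2, r3, r4, r5⟩

-- a fold of inserts at keys not equal to t leaves getD t unchanged
lemma pv_merge_getD_notmem (pairs : List (Int × Int)) (t : Int)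
    (h : t ∉ pairs.map Prod.fst) :
    ∀ agg : PySem.Dict Int (Int × Int × Int),
      (pairs.foldl (fun agg dv => agg.insert dv.1 (pvStep (agg.getD dv.1 (0, 0, 0)) dv.2)) agg).getD t (0, 0, 0)
        = agg.getD t (0, 0, 0) := by
  revert h
  induction pairs with
  | nil => intro _ agg; rfl
  | cons kv pairs ih =>
    intro h agg
    simp only [List.map_cons, List.mem_cons] at h
    push_neg at h
    simp only [List.foldl_cons]
    rw [ih (fun hm => h.2 hm) _, PySem.Dict.getD_insert, if_neg h.1]

lemma pv_merge_getD_mem (pairs : List (Int × Int)) (t v : Int)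
    (hnd : (pairs.map Prod.fst).Nodup) (hmem : (t, v) ∈ pairs) :
    ∀ agg : PySem.Dict Int (Int × Int × Int),
      (pairs.foldl (fun agg dv => agg.insert dv.1 (pvStep (agg.getD dv.1 (0, 0, 0)) dv.2)) agg).getD t (0, 0, 0)
        = pvStep (agg.getD t (0, 0, 0)) v := by
  revert hnd hmem
  induction pairs with
  | nil => intro _ hmem; cases hmem
  | cons kv pairs ih =>
    intro hnd hmem agg
    simp only [List.map_cons, List.nodup_cons] at hnd
    simp only [List.foldl_cons]
    rcases List.mem_cons.1 hmem with h | h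
    · subst h
      have hnm : t ∉ pairs.map Prod.fst := by simpa using hnd.1
      rw [pv_merge_getD_notmem pairs t hnm, PySem.Dict.getD_insert, if_pos rfl]
    · have hne : t ≠ kv.1 := by
        intro he
        exact hnd.1 (he ▸ (List.mem_map.2 ⟨(t, v), h, rfl⟩))
      rw [ih hnd.2 h _, PySem.Dict.getD_insert, if_neg hne]

-- relation between A's power sums and B's incremental elementary symmetric sums
lemma pv_sym3 : ∀ (cs : List Int) (s p : Int × Int × Int),
    p.1 = s.1 → 2 * p.2.1 = s.1 * s.1 - s.2.1 →
    6 * p.2.2 = s.1 * s.1 * s.1 - 3 * s.1 * s.2.1 + 2 * s.2.2 →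
    (cs.foldl pvStep p).1 = (cs.foldl (fun s c => (s.1 + c, s.2.1 + c * c, s.2.2 + c * c * c)) s).1 ∧
    2 * (cs.foldl pvStep p).2.1 =
      (cs.foldl (fun s c => (s.1 + c, s.2.1 + c * c, s.2.2 + c * c * c)) s).1 *
        (cs.foldl (fun s c => (s.1 + c, s.2.1 + c * c, s.2.2 + c * c * c)) s).1 -
        (cs.foldl (fun s c => (s.1 + c, s.2.1 + c * c, s.2.2 + c * c * c)) s).2.1 ∧
    6 * (cs.foldl pvStep p).2.2 =
      (cs.foldl (fun s c => (s.1 + c, s.2.1 + c * c, s.2.2 + c * c * c)) s).1 *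
        (cs.foldl (fun s c => (s.1 + c, s.2.1 + c * c, s.2.2 + c * c * c)) s).1 *
        (cs.foldl (fun s c => (s.1 + c, s.2.1 + c * c, s.2.2 + c * c * c)) s).1 -
        3 * (cs.foldl (fun s c => (s.1 + c, s.2.1 + c * c, s.2.2 + c * c * c)) s).1 *
          (cs.foldl (fun s c => (s.1 + c, s.2.1 + c * c, s.2.2 + c * c * c)) s).2.1 +
        2 * (cs.foldl (fun s c => (s.1 + c, s.2.1 + c * c, s.2.2 + c * c * c)) s).2.2 := by
  intro cs
  induction cs with
  | nil => intro s p h1 h2 h3; exact ⟨h1, h2, h3⟩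
  | cons c cs ih =>
    intro s p h1 h2 h3
    simp only [List.foldl_cons]
    refine ih _ _ ?_ ?_ ?_
    · simp only [pvStep]; rw [h1]
    · simp only [pvStep]; linear_combination h2 + 2 * c * h1
    · simp only [pvStep]; linear_combination h3 + 3 * c * h2

-- summing a function that vanishes off K over a nodup superset S equals summing it over K
lemma pv_sum_subset (K S : List Int) (f : Int → Int) (hK : K.Nodup) (hS : S.Nodup)
    (hsub : ∀ k ∈ K, k ∈ S) (hz : ∀ t ∈ S, t ∉ K → f t = 0) :
    (S.map f).sum = (K.map f).sum := by
  rw [← List.sum_toFinset f hK, ← List.sum_toFinset f hS]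
  refine (Finset.sum_subset ?_ ?_).symm
  · intro x hx
    exact List.mem_toFinset.2 (hsub x (List.mem_toFinset.1 hx))
  · intro x hx hnx
    exact hz x (List.mem_toFinset.1 hx) (fun hm => hnx (List.mem_toFinset.2 hm))

-- lockstep relation for the branch loop over the centre's neighbours
lemma pv_branches_rel (adj : List (List Int)) (sz : Int) (fuel : Nat) :
    ∀ (nbrs : List Int) (vis : List Bool) (bcs : List (List Int)) (maxd : Int)
      (agg : PySem.Dict Int (Int × Int × Int)) (nb : Int),
      0 ≤ maxd → nb = (bcs.length : Int) → agg.keys.Nodup →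
      (∀ k ∈ agg.keys, 1 ≤ k ∧ k ≤ maxd) →
      (∀ t : Int, 1 ≤ t →
        agg.getD t (0, 0, 0) = bcs.foldl (fun p f => pvStep p (f.getD t.toNat 0)) (0, 0, 0)) →
      (nbrs.foldl (pvBranchStepA adj sz fuel) (vis, bcs, maxd)).1
        = (nbrs.foldl (pvBranchStepB adj sz fuel) (vis, agg, nb)).1 ∧
      0 ≤ (nbrs.foldl (pvBranchStepA adj sz fuel) (vis, bcs, maxd)).2.2 ∧
      (nbrs.foldl (pvBranchStepB adj sz fuel) (vis, agg, nb)).2.2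
        = ((nbrs.foldl (pvBranchStepA adj sz fuel) (vis, bcs, maxd)).2.1.length : Int) ∧
      (nbrs.foldl (pvBranchStepB adj sz fuel) (vis, agg, nb)).2.1.keys.Nodup ∧
      (∀ k ∈ (nbrs.foldl (pvBranchStepB adj sz fuel) (vis, agg, nb)).2.1.keys,
        1 ≤ k ∧ k ≤ (nbrs.foldl (pvBranchStepA adj sz fuel) (vis, bcs, maxd)).2.2) ∧
      (∀ t : Int, 1 ≤ t →
        (nbrs.foldl (pvBranchStepB adj sz fuel) (vis, agg, nb)).2.1.getD t (0, 0, 0)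
          = (nbrs.foldl (pvBranchStepA adj sz fuel) (vis, bcs, maxd)).2.1.foldl
              (fun p f => pvStep p (f.getD t.toNat 0)) (0, 0, 0)) := by
  intro nbrs
  induction nbrs with
  | nil =>
    intro vis bcs maxd agg nb hm hnb hnd hkeys hrel
    exact ⟨rfl, hm, hnb, hnd, hkeys, fun t ht => hrel t ht⟩
  | cons nbr nbrs ih =>
    intro vis bcs maxd agg nb hm hnb hnd hkeys hrel
    simp only [List.foldl_cons]
    by_cases hv : vis.getD (pvIdx sz nbr) false = true
    · have hv2 : vis[pvIdx sz nbr]?.getD false = true := by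
        rwa [List.getD_eq_getElem?_getD] at hv
      rw [show pvBranchStepA adj sz fuel (vis, bcs, maxd) nbr = (vis, bcs, maxd) from by
          simp [pvBranchStepA, hv2],
        show pvBranchStepB adj sz fuel (vis, agg, nb) nbr = (vis, agg, nb) from by
          simp [pvBranchStepB, hv2]]
      exact ih vis bcs maxd agg nb hm hnb hnd hkeys hrel
    · have hv' : vis.getD (pvIdx sz nbr) false = false := by
        cases h : vis.getD (pvIdx sz nbr) false
        · rfl
        · exact absurd h hv
      rw [List.getD_eq_getElem?_getD] at hv'
      set vis1 := vis.set (pvIdx sz nbr) true with hvis1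
      obtain ⟨r1, r2, r3, r4, r5⟩ := pv_bfs_rel adj sz fuel [(nbr, 1)] vis1 []
        PySem.Dict.empty maxd hm
        (by intro p hp; simp at hp; rw [hp]; constructor <;> simp <;> omega)
        (by intro t ht; simp [PySem.Dict.getD_empty])
        (by intro k hk; simp [PySem.Dict.keys_empty] at hk)
        (by simp [PySem.Dict.keys_empty])
      rw [show pvBranchStepA adj sz fuel (vis, bcs, maxd) nbr
            = ((pvBfsA adj sz fuel [(nbr, 1)] vis1 [] maxd).1,
               bcs ++ [(pvBfsA adj sz fuel [(nbr, 1)] vis1 [] maxd).2.1],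
               (pvBfsA adj sz fuel [(nbr, 1)] vis1 [] maxd).2.2) from by
          simp [pvBranchStepA, hv', ← hvis1],
        show pvBranchStepB adj sz fuel (vis, agg, nb) nbr
            = ((pvBfsB adj sz fuel [(nbr, 1)] vis1 PySem.Dict.empty).1,
               pvMerge agg (pvBfsB adj sz fuel [(nbr, 1)] vis1 PySem.Dict.empty).2, nb + 1) from by
          simp [pvBranchStepB, hv', ← hvis1]]
      set rA := pvBfsA adj sz fuel [(nbr, 1)] vis1 [] maxd with hrA
      set rB := pvBfsB adj sz fuel [(nbr, 1)] vis1 PySem.Dict.empty with hrB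
      rw [r1]
      have hkeysM : ∀ k ∈ (pvMerge agg rB.2).keys, 1 ≤ k ∧ k ≤ rA.2.2 := by
        intro k hk
        rw [pvMerge, PySem.Dict.keys_foldl_insert_key] at hk
        rcases (PySem.Set.mem_update _ _ _).1 hk with h | h
        · obtain ⟨ha, hb⟩ := hkeys k h; exact ⟨ha, le_trans hb r2⟩
        · exact r4 k h
      have hndM : (pvMerge agg rB.2).keys.Nodup :=
        PySem.Dict.nodup_keys_foldl_insert_key _ _ _ _ hnd
      have hrelM : ∀ t : Int, 1 ≤ t →
          (pvMerge agg rB.2).getD t (0, 0, 0)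
            = (bcs ++ [rA.2.1]).foldl (fun p f => pvStep p (f.getD t.toNat 0)) (0, 0, 0) := by
        intro t ht
        rw [List.foldl_append, List.foldl_cons, List.foldl_nil, ← hrel t ht]
        by_cases hc : t ∈ rB.2.keys
        · obtain ⟨v, hvget⟩ : ∃ v, rB.2.get? t = some v := by
            rcases h : rB.2.get? t with _ | v
            · exact absurd hc ((PySem.Dict.get?_eq_none_iff_not_mem_keys _ _).1 h)
            · exact ⟨v, rfl⟩
          have hvmem : (t, v) ∈ rB.2.items := PySem.Dict.mem_items_of_get?_eq_some _ hvget
          have : (pvMerge agg rB.2).getD t (0, 0, 0) = pvStep (agg.getD t (0, 0, 0)) v :=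
            pv_merge_getD_mem rB.2.items t v r5 hvmem agg
          rw [this, r3 t ht, PySem.Dict.getD_of_get?_eq_some _ _ hvget]
        · have hc' : t ∉ rB.2.items.map Prod.fst := by
            intro hmm
            exact hc (by simpa [PySem.Dict.keys] using hmm)
          have hmerge : (pvMerge agg rB.2).getD t (0, 0, 0) = agg.getD t (0, 0, 0) :=
            pv_merge_getD_notmem rB.2.items t hc' agg
          have hcf : rB.2.contains t = false := by
            rw [← Bool.not_eq_true]
            exact fun hcc => hc ((PySem.Dict.contains_iff_mem_keys rB.2 t).1 hcc)
          rw [hmerge, r3 t ht, PySem.Dict.getD_of_not_contains rB.2 (0 : Int) hcf, pvStep_zero]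
      exact ih rB.1 (bcs ++ [rA.2.1]) rA.2.2 (pvMerge agg rB.2) (nb + 1)
        (le_trans hm r2) (by rw [hnb]; simp) hndM hkeysM hrelM

-- ===== VERDICT (by name: the statement is the Claim_ definition above) =====
-- per-centre equality: A's body and B's body return the same update of ans
lemma pv_center_eq (N : Int) (edges : List (Int × Int)) (ans c : Int) :
    (fun ans c =>
      if ((pvAdj N edges).getD (pvIdx (N + 1) c) []).length < 3 then ans
      else
        let vis0 := (List.replicate (N + 1).toNat false).set (pvIdx (N + 1) c) true
        let r := ((pvAdj N edges).getD (pvIdx (N + 1) c) []).foldl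
          (pvBranchStepA (pvAdj N edges) (N + 1) (N + 2).toNat) (vis0, [], 0)
        if r.2.1.length < 3 then ans
        else
          (PySem.List.pyRange 1 (r.2.2 + 1) 1).foldl
            (fun ans t =>
              let s := r.2.1.foldl
                (fun (s : Int × Int × Int) f =>
                  let cnt := if t < (f.length : Int) then f.getD t.toNat 0 else 0
                  (s.1 + cnt, s.2.1 + cnt * cnt, s.2.2 + cnt * cnt * cnt))
                (0, 0, 0)
              ans + PySem.Int.floordiv (s.1 * s.1 * s.1 - 3 * s.1 * s.2.1 + 2 * s.2.2) 6)
            ans) ans c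
    = (fun ans c =>
      if ((pvAdj N edges).getD (pvIdx (N + 1) c) []).length < 3 then ans
      else
        let vis0 := (List.replicate (N + 1).toNat false).set (pvIdx (N + 1) c) true
        let r := ((pvAdj N edges).getD (pvIdx (N + 1) c) []).foldl
          (pvBranchStepB (pvAdj N edges) (N + 1) (N + 2).toNat) (vis0, PySem.Dict.empty, 0)
        if r.2.2 ≥ 3 then ans + r.2.1.values.foldl (fun s v => s + v.2.2) 0 else ans) ans c := by
  simp only []
  by_cases hdeg : ((pvAdj N edges).getD (pvIdx (N + 1) c) []).length < 3
  · rw [if_pos hdeg, if_pos hdeg]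
  · rw [if_neg hdeg, if_neg hdeg]
    set adj := pvAdj N edges
    set nbrs := (adj.getD (pvIdx (N + 1) c) [])
    set vis0 := (List.replicate (N + 1).toNat false).set (pvIdx (N + 1) c) true with hvis0
    obtain ⟨r1, r2, r3, r4, r5, r6⟩ := pv_branches_rel adj (N + 1) (N + 2).toNat nbrs vis0 [] 0
      PySem.Dict.empty 0 le_rfl (by simp) (by simp [PySem.Dict.keys_empty])
      (by intro k hk; simp [PySem.Dict.keys_empty] at hk)
      (by intro t ht; simp [PySem.Dict.getD_empty])
    set rA := nbrs.foldl (pvBranchStepA adj (N + 1) (N + 2).toNat) (vis0, [], 0) with hrAdef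
    set rB := nbrs.foldl (pvBranchStepB adj (N + 1) (N + 2).toNat) (vis0, PySem.Dict.empty, 0)
      with hrBdef
    by_cases hb : rA.2.1.length < 3
    · rw [if_pos hb, if_neg (by rw [r3]; omega)]
    · rw [if_neg hb, if_pos (by rw [r3]; omega)]
      -- A side: rewrite the per-distance power sums into B's dict entries
      have hstep : ∀ t : Int, 1 ≤ t →
          (rA.2.1.foldl
            (fun (s : Int × Int × Int) f =>
              let cnt := if t < (f.length : Int) then f.getD t.toNat 0 else 0
              (s.1 + cnt, s.2.1 + cnt * cnt, s.2.2 + cnt * cnt * cnt)) (0, 0, 0))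
          = ((rA.2.1.map (fun f => f.getD t.toNat 0)).foldl
              (fun (s : Int × Int × Int) cnt =>
                (s.1 + cnt, s.2.1 + cnt * cnt, s.2.2 + cnt * cnt * cnt)) (0, 0, 0)) := by
        intro t ht
        rw [List.foldl_map]
        refine PySem.List.foldl_congr_mem _ _ _ _ ?_
        intro acc f _
        by_cases hlt : t < (f.length : Int)
        · simp only [if_pos hlt]
        · simp only [if_neg hlt]
          rw [List.getD_eq_default _ _ (by omega : f.length ≤ t.toNat)]
      have hterm : ∀ t ∈ PySem.List.pyRange 1 (rA.2.2 + 1) 1,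
          (fun t =>
            PySem.Int.floordiv
              ((rA.2.1.foldl
                (fun (s : Int × Int × Int) f =>
                  let cnt := if t < (f.length : Int) then f.getD t.toNat 0 else 0
                  (s.1 + cnt, s.2.1 + cnt * cnt, s.2.2 + cnt * cnt * cnt)) (0, 0, 0)).1 *
                  (rA.2.1.foldl
                (fun (s : Int × Int × Int) f =>
                  let cnt := if t < (f.length : Int) then f.getD t.toNat 0 else 0
                  (s.1 + cnt, s.2.1 + cnt * cnt, s.2.2 + cnt * cnt * cnt)) (0, 0, 0)).1 *
                  (rA.2.1.foldl
                (fun (s : Int × Int × Int) f =>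
                  let cnt := if t < (f.length : Int) then f.getD t.toNat 0 else 0
                  (s.1 + cnt, s.2.1 + cnt * cnt, s.2.2 + cnt * cnt * cnt)) (0, 0, 0)).1 -
                3 * (rA.2.1.foldl
                (fun (s : Int × Int × Int) f =>
                  let cnt := if t < (f.length : Int) then f.getD t.toNat 0 else 0
                  (s.1 + cnt, s.2.1 + cnt * cnt, s.2.2 + cnt * cnt * cnt)) (0, 0, 0)).1 *
                  (rA.2.1.foldl
                (fun (s : Int × Int × Int) f =>
                  let cnt := if t < (f.length : Int) then f.getD t.toNat 0 else 0
                  (s.1 + cnt, s.2.1 + cnt * cnt, s.2.2 + cnt * cnt * cnt)) (0, 0, 0)).2.1 +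
                2 * (rA.2.1.foldl
                (fun (s : Int × Int × Int) f =>
                  let cnt := if t < (f.length : Int) then f.getD t.toNat 0 else 0
                  (s.1 + cnt, s.2.1 + cnt * cnt, s.2.2 + cnt * cnt * cnt)) (0, 0, 0)).2.2) 6) t
          = (fun t => (rB.2.1.getD t (0, 0, 0)).2.2) t := by
        intro t hmem
        obtain ⟨ht1, _⟩ := PySem.List.mem_pyRange_one.1 hmem
        simp only []
        rw [hstep t ht1]
        obtain ⟨e1, e2, e3⟩ := pv_sym3 (rA.2.1.map (fun f => f.getD t.toNat 0))
          (0, 0, 0) (0, 0, 0) rfl (by ring) (by ring)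
        have hfm := List.foldl_map (f := fun f : List Int => f.getD t.toNat 0) (g := pvStep)
          (l := rA.2.1) (init := ((0, 0, 0) : Int × Int × Int))
        rw [r6 t ht1, ← hfm]
        set P := ((rA.2.1.map (fun f => f.getD t.toNat 0)).foldl pvStep (0, 0, 0))
        set S := ((rA.2.1.map (fun f => f.getD t.toNat 0)).foldl
          (fun (s : Int × Int × Int) c => (s.1 + c, s.2.1 + c * c, s.2.2 + c * c * c)) (0, 0, 0))
        exact (PySem.Int.floordiv_eq_iff_of_pos (by omega : (0:Int) < 6)).2
          ⟨by linarith [e3], by linarith [e3]⟩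
      calc (PySem.List.pyRange 1 (rA.2.2 + 1) 1).foldl
              (fun ans t =>
                ans + PySem.Int.floordiv
                  ((rA.2.1.foldl
                    (fun (s : Int × Int × Int) f =>
                      let cnt := if t < (f.length : Int) then f.getD t.toNat 0 else 0
                      (s.1 + cnt, s.2.1 + cnt * cnt, s.2.2 + cnt * cnt * cnt)) (0, 0, 0)).1 * _ * _ - _ + _) 6) ans
          = ans + ((PySem.List.pyRange 1 (rA.2.2 + 1) 1).map
              (fun t => (rB.2.1.getD t (0, 0, 0)).2.2)).sum := by
            rw [PySem.List.foldl_add, List.map_congr_left hterm]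
        _ = ans + rB.2.1.values.foldl (fun s v => s + v.2.2) 0 := by
            rw [PySem.List.foldl_add, zero_add,
              PySem.Dict.values_eq_map_keys rB.2.1 r4 (0, 0, 0), List.map_map]
            congr 1
            refine pv_sum_subset rB.2.1.keys _ _ r4 (PySem.List.nodup_pyRange_one _ _) ?_ ?_
            · intro k hk
              obtain ⟨hk1, hk2⟩ := r5 k hk
              exact PySem.List.mem_pyRange_one.2 ⟨hk1, by omega⟩
            · intro t _ htn
              have hcf : rB.2.1.contains t = false := by
                rw [← Bool.not_eq_true]
                exact fun hcc => htn ((PySem.Dict.contains_iff_mem_keys rB.2.1 t).1 hcc)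
              rw [PySem.Dict.getD_of_not_contains rB.2.1 _ hcf]

theorem compute_reference_answer_py_spec : Claim_equal_compute_reference_answer_py := by
  intro N edges _ _
  unfold Spec_compute_reference_answer_py
  unfold compute_reference_answer_py compute_reference_answer_py_alt
  simp only []
  exact PySem.List.foldl_congr_mem _ _ _ _ (fun ans c _ => pv_center_eq N edges ans c)
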